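-- pv_equiv track=rewrite | github.com/AdaCore/gnatdashboard | gnathub/src/lib/GNAThub/__init__.py | quote
-- ===== SOURCE A (Python) =====
-- def quote(arg):
--     """Return the quoted version of the given argument.
--
--     :param str arg: the argument to quote
--     :return: the quoted argument
--     :rtype: str
--     """
--     specials = ('|', '&', ';', '<', '>', '(', ')', '$', '`', '\\', '"',
--                 "'", ' ', '\t', '\n', '*', '?', '[', '#', '~')
--     for char in specials:
--         if char in arg:
--             arg = arg.replace("'", r"'\''")
--             arg = arg.replace('\n', r"'\n'")
--             return "'%s'" % arg
--     return arg
-- ===== SOURCE B (Python) =====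
-- def quote(arg):
--     """Return the quoted version of the given argument.
--
--     Single left-to-right pass: escape each character on the fly while
--     remembering whether any shell-special character was seen; no .replace.
--     """
--     out = []
--     needs = False
--     for ch in arg:
--         if ch == "'":
--             needs = True
--             out.append("'\\''")
--         elif ch == '\n':
--             needs = True
--             out.append("'\\n'")
--         else:
--             if ch in '|&;<>()$`\\" \t*?[#~':
--                 needs = True
--             out.append(ch)
--     return "'%s'" % ''.join(out) if needs else arg
-- ===== Notes on version B (the rewrite author's own statement) =====
-- stated objective: alternative
-- what changed: B is a single accumulator pass over arg that escapes quote/newline characters on the fly and records a needs-quote flag, replacing A's staged pipeline of 20 substring searches followed by two whole-string .replace passes and a wrap.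
import Mathlib
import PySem

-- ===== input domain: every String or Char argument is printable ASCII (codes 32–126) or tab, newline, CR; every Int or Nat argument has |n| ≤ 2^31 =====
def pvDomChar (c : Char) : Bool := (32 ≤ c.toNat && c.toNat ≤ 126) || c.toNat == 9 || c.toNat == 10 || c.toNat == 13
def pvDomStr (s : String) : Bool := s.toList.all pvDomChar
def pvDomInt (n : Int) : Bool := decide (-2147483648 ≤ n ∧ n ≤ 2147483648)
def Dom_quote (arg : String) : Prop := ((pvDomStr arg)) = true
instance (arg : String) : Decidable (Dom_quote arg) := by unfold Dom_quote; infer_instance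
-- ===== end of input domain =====

-- B replaces A's staged pipeline (20 substring searches, then two whole-string
-- replaces, then wrap) by ONE accumulator pass that escapes characters on the fly
-- while recording a needs-quote flag (alternative decomposition, same cost class).

-- ===== PORT A =====
def quoteSpecials : List String :=
  ["|", "&", ";", "<", ">", "(", ")", "$", "`", "\\", "\"",
   "'", " ", "\t", "\n", "*", "?", "[", "#", "~"]

-- the 'for char in specials: if char in arg: return …' loop, as structural recursion
def quoteLoop (arg : String) : List String → String
  | [] => arg
  | c :: rest =>
    if PySem.Str.isIn c arg then
      "'" ++ PySem.Str.replace (PySem.Str.replace arg "'" "'\\''") "\n" "'\\n'" ++ "'"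
    else quoteLoop arg rest

def quote (arg : String) : String := quoteLoop arg quoteSpecials

-- ===== PORT B =====
-- the specials other than ' and '\n' (those two get their own branches in the loop)
def quotePlainSpecials : List Char := "|&;<>()$`\\\" \t*?[#~".toList

-- one step of Source B's loop: state = (needs-quote flag, accumulated escaped output)
def quoteStep (st : Bool × List Char) (ch : Char) : Bool × List Char :=
  if ch = '\'' then (true, st.2 ++ "'\\''".toList)
  else if ch = '\n' then (true, st.2 ++ "'\\n'".toList)
  else ((st.1 || quotePlainSpecials.contains ch), st.2 ++ [ch])

def quote_alt (arg : String) : String :=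
  let st := arg.toList.foldl quoteStep (false, [])
  if st.1 then "'" ++ String.ofList st.2 ++ "'" else arg

-- ===== PRECONDITION & SPEC =====
def Spec_quote (arg : String) (out : String) : Prop := out = quote_alt arg
instance (arg : String) (out : String) : Decidable (Spec_quote arg out) := by unfold Spec_quote; infer_instance

-- ===== CLAIM =====
def Claim_equal_quote : Prop := ∀ (arg : String), Dom_quote arg → Spec_quote arg (quote arg)

-- ===== LEMMAS AND PROOFS =====

-- per-character escaping: what one pass produces for each input character
def escChar (c : Char) : List Char :=
  if c = '\'' then "'\\''".toList
  else if c = '\n' then "'\\n'".toList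
  else [c]

def allSpecialChars : List Char := "|&;<>()$`\\\"' \t\n*?[#~".toList

-- replace with a single-character pattern is a per-character flatMap
lemma replace_go_single (c : Char) (new : List Char) :
    ∀ fuel l acc, l.length ≤ fuel →
      PySem.Chars.replace.go [c] new fuel l acc
        = acc.reverse ++ l.flatMap (fun x => if x = c then new else [x]) := by
  intro fuel
  induction fuel with
  | zero =>
    intro l acc h
    have : l = [] := List.eq_nil_of_length_eq_zero (Nat.le_zero.mp h)
    subst this; simp [PySem.Chars.replace.go]
  | succ n ih =>
    intro l acc h
    cases l with
    | nil => simp [PySem.Chars.replace.go]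
    | cons x t =>
      have ht : t.length ≤ n := by simpa using h
      by_cases hx : x = c
      · subst hx
        have hpre : List.isPrefixOf [x] (x :: t) = true := by
          simp [List.isPrefixOf]
        simp only [PySem.Chars.replace.go, hpre, if_pos]
        rw [ih _ _ (by simpa using ht)]
        simp
      · have hpre : List.isPrefixOf [c] (x :: t) = false := by
          simp [List.isPrefixOf]
          intro hcx; exact absurd hcx.symm hx
        simp only [PySem.Chars.replace.go, hpre, Bool.false_eq_true, if_false]
        rw [ih _ _ ht]
        simp [hx]

lemma replace_single (s : List Char) (c : Char) (new : List Char) :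
    PySem.Chars.replace s [c] new = s.flatMap (fun x => if x = c then new else [x]) := by
  unfold PySem.Chars.replace
  rw [if_neg (by simp)]
  simpa using replace_go_single c new s.length s [] le_rfl

-- the two staged replaces of A equal one flatMap of escChar
lemma double_replace_eq (s : List Char) :
    PySem.Chars.replace (PySem.Chars.replace s ['\''] "'\\''".toList) ['\n'] "'\\n'".toList
      = s.flatMap escChar := by
  rw [replace_single, replace_single, List.flatMap_assoc]
  apply List.flatMap_congr
  intro x _
  by_cases h1 : x = '\''
  · subst h1; simp [escChar]
  · by_cases h2 : x = '\n' <;> simp [h1, h2, escChar]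

-- the foldl invariant of B's single pass
lemma foldl_quoteStep (l : List Char) (b : Bool) (acc : List Char) :
    l.foldl quoteStep (b, acc)
      = (b || l.any (fun ch => allSpecialChars.contains ch), acc ++ l.flatMap escChar) := by
  induction l generalizing b acc with
  | nil => simp
  | cons x t ih =>
    simp only [List.foldl_cons, List.any_cons]
    by_cases h1 : x = '\''
    · subst h1
      rw [show quoteStep (b, acc) '\'' = (true, acc ++ "'\\''".toList) from rfl, ih]
      simp [escChar, allSpecialChars]
    · by_cases h2 : x = '\n'
      · subst h2
        rw [show quoteStep (b, acc) '\n' = (true, acc ++ "'\\n'".toList) from by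
              simp [quoteStep], ih]
        simp [escChar, allSpecialChars]
      · rw [show quoteStep (b, acc) x
              = ((b || quotePlainSpecials.contains x), acc ++ [x]) from by
              simp [quoteStep, h1, h2], ih]
        have hperm : allSpecialChars.Perm ('\'' :: '\n' :: quotePlainSpecials) := by
          decide
        have hmem : (allSpecialChars.contains x) = (quotePlainSpecials.contains x) := by
          simp only [List.contains_eq_mem]
          rw [Bool.eq_iff_iff]
          simp only [decide_eq_true_eq, hperm.mem_iff, List.mem_cons]
          constructor
          · rintro (h | h | h)
            · exact absurd h h1
            · exact absurd h h2
            · exact h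
          · intro h; exact Or.inr (Or.inr h)
        rw [hmem]
        simp [escChar, h1, h2, Bool.or_assoc]

-- connecting A's condition (some special substring occurs in arg) to B's flag
lemma singleton_infix_iff_mem {c : Char} {l : List Char} : [c] <:+: l ↔ c ∈ l := by
  constructor
  · intro h; exact h.sublist.subset (List.mem_singleton_self c)
  · intro h
    obtain ⟨s, t, rfl⟩ := List.append_of_mem h
    exact ⟨s, t, by simp⟩

lemma isIn_singleton_iff (ch : Char) (arg : String) :
    PySem.Str.isIn (String.ofList [ch]) arg = true ↔ ch ∈ arg.toList := by
  rw [PySem.Str.isIn_iff_infix]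
  simp only [String.toList_ofList]
  exact singleton_infix_iff_mem

lemma quoteSpecials_eq_map :
    quoteSpecials = allSpecialChars.map (fun ch => String.ofList [ch]) := by
  decide

lemma any_specials_eq (arg : String) :
    quoteSpecials.any (fun c => PySem.Str.isIn c arg)
      = arg.toList.any (fun ch => allSpecialChars.contains ch) := by
  rw [quoteSpecials_eq_map, List.any_map]
  apply Bool.eq_iff_iff.mpr
  simp only [List.any_eq_true, Function.comp, isIn_singleton_iff,
    List.contains_eq_mem, decide_eq_true_eq]
  exact ⟨fun ⟨c, h1, h2⟩ => ⟨c, h2, h1⟩, fun ⟨c, h1, h2⟩ => ⟨c, h2, h1⟩⟩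

lemma quoteLoop_eq (arg : String) (cs : List String) :
    quoteLoop arg cs =
      if cs.any (fun c => PySem.Str.isIn c arg) then
        "'" ++ PySem.Str.replace (PySem.Str.replace arg "'" "'\\''") "\n" "'\\n'" ++ "'"
      else arg := by
  induction cs with
  | nil => simp [quoteLoop]
  | cons c rest ih =>
    show (if PySem.Str.isIn c arg then _ else quoteLoop arg rest) = _
    by_cases h : PySem.Str.isIn c arg = true
    · rw [if_pos h,
        if_pos (by simp only [List.any_cons, Bool.or_eq_true]; exact Or.inl h)]
    · have h' : PySem.Str.isIn c arg = false := eq_false_of_ne_true h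
      have hc : (c :: rest).any (fun c => PySem.Str.isIn c arg)
          = rest.any (fun c => PySem.Str.isIn c arg) := by
        simp only [List.any_cons, h', Bool.false_or]
      rw [if_neg h, ih, hc]

-- the quoted bodies coincide (as strings)
lemma body_eq (arg : String) :
    PySem.Str.replace (PySem.Str.replace arg "'" "'\\''") "\n" "'\\n'"
      = String.ofList (arg.toList.flatMap escChar) := by
  apply String.toList_injective
  simp only [PySem.Str.toList_replace, String.toList_ofList]
  exact double_replace_eq arg.toList

-- ===== VERDICT =====
theorem quote_spec : Claim_equal_quote := by
  intro arg _
  unfold Spec_quote quote quote_alt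
  rw [quoteLoop_eq, any_specials_eq, foldl_quoteStep]
  simp only [Bool.false_or, List.nil_append]
  by_cases h : arg.toList.any (fun ch => allSpecialChars.contains ch) = true
  · rw [if_pos h, if_pos h, body_eq]
  · rw [if_neg h, if_neg h]
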